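-- pv_equiv track=rewrite | github.com/rahul43177/wifi-time-calculator | app/analytics.py | _aggregate_day_minutes
-- ===== SOURCE A (Python) =====
-- from typing import Any, Dict, List, Optional
--
-- def _safe_non_negative_minutes(value: Any) -> int:
--     """Parse minutes and clamp invalid/negative values to zero."""
--     try:
--         parsed = int(value)
--     except (TypeError, ValueError):
--         return 0
--     return max(0, parsed)
--
-- def _aggregate_day_minutes(sessions: Any) -> int:
--     """Aggregate total minutes for one day with duplicate protection."""
--     if not isinstance(sessions, list):
--         return 0
--
--     day_minutes = 0
--     seen_sessions = set()
--     for session in sessions: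
--         if not isinstance(session, dict):
--             continue
--
--         key = (session.get("start_time"), session.get("ssid"))
--         if key in seen_sessions:
--             continue
--         seen_sessions.add(key)
--
--         day_minutes += _safe_non_negative_minutes(session.get("duration_minutes"))
--     return day_minutes
-- ===== SOURCE B (Python) =====
-- def _safe_non_negative_minutes(value):
--     """Parse minutes and clamp invalid/negative values to zero."""
--     try:
--         parsed = int(value)
--     except (TypeError, ValueError):
--         return 0
--     return max(0, parsed)
--
-- def _aggregate_day_minutes(sessions):
--     """Aggregate total minutes for one day with duplicate protection.
--
--     Nub-style: repeatedly take the first pending session, count it, and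
--     filter every later session sharing its (start_time, ssid) key out of
--     the pending list -- no seen-set, no dict."""
--     if not isinstance(sessions, list):
--         return 0
--     pending = [s for s in sessions if isinstance(s, dict)]
--     total = 0
--     while pending:
--         head = pending[0]
--         key = (head.get("start_time"), head.get("ssid"))
--         total += _safe_non_negative_minutes(head.get("duration_minutes"))
--         pending = [s for s in pending[1:]
--                    if (s.get("start_time"), s.get("ssid")) != key]
--     return total
-- ===== Notes on version B (the rewrite author's own statement) =====
-- stated objective: alternative
-- what changed: Replaces the seen-set + running-total single pass by a nub-style elimination loop: take the first pending session, count its clamped minutes, and filter all later sessions with the same (start_time, ssid) key out of the pending list; no set or dict is maintained.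
import Mathlib
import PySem

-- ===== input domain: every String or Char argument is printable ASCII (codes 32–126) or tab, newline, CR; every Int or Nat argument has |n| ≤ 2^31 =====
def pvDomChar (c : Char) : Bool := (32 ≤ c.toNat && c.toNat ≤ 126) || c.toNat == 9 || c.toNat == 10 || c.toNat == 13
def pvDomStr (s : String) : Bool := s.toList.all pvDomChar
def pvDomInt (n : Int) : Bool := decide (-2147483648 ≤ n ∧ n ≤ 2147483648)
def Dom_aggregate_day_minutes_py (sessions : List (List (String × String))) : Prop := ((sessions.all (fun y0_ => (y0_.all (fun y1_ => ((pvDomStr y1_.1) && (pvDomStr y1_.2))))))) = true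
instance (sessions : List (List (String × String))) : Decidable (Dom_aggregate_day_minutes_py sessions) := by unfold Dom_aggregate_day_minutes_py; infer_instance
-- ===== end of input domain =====

-- B replaces A's seen-set + running-total pass by a nub-style elimination loop: count the
-- first pending session, then filter all later sessions with the same key ("alternative").

-- ===== PORT A =====
-- _safe_non_negative_minutes: int(value) with TypeError/ValueError -> 0, then max(0, parsed).
-- value is Option String (None when the key is missing); int(None) raises TypeError -> 0.
def pv_safe_minutes (value : Option String) : Int :=
  match value with
  | none => 0
  | some s =>
    match PySem.Int.ofStr? s with
    | none => 0
    | some parsed => max 0 parsed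

-- key = (session.get("start_time"), session.get("ssid"))
def pv_key (session : List (String × String)) : Option String × Option String :=
  ((PySem.Dict.mk session).get? "start_time", (PySem.Dict.mk session).get? "ssid")

-- A's loop: running total + seen-keys set (isinstance guards are vacuous under the Lean types)
def pvA_loop (rest : List (List (String × String))) (total : Int)
    (seen : PySem.Set (Option String × Option String)) : Int :=
  match rest with
  | [] => total
  | session :: rest =>
    let key := pv_key session
    if PySem.Set.contains seen key then
      pvA_loop rest total seen
    else
      pvA_loop rest (total + pv_safe_minutes ((PySem.Dict.mk session).get? "duration_minutes"))
        (PySem.Set.add seen key)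

def aggregate_day_minutes_py (sessions : List (List (String × String))) : Int :=
  pvA_loop sessions 0 PySem.Set.empty

-- ===== PORT B =====
-- the 'while pending:' loop: count the head's clamped minutes, then drop every later
-- session whose (start_time, ssid) key equals the head's. Terminates since the filtered
-- tail is no longer than the tail.
def pvB_loop (pending : List (List (String × String))) : Int :=
  match pending with
  | [] => 0
  | head :: rest =>
    pv_safe_minutes ((PySem.Dict.mk head).get? "duration_minutes")
      + pvB_loop (rest.filter (fun s => pv_key s ≠ pv_key head))
termination_by pending.length
decreasing_by
  simpa using Nat.lt_succ_of_le (le_trans (List.length_filter_le _ _) (by simp))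

def aggregate_day_minutes_py_alt (sessions : List (List (String × String))) : Int :=
  pvB_loop sessions

-- ===== PRECONDITION & SPEC =====
def Spec_aggregate_day_minutes_py (sessions : List (List (String × String))) (out : Int) : Prop := out = aggregate_day_minutes_py_alt sessions
instance (sessions : List (List (String × String))) (out : Int) : Decidable (Spec_aggregate_day_minutes_py sessions out) := by unfold Spec_aggregate_day_minutes_py; infer_instance

-- ===== CLAIM (what is proved, stated in full; the proofs are below) =====
def Claim_equal_aggregate_day_minutes_py : Prop := ∀ (sessions : List (List (String × String))), Dom_aggregate_day_minutes_py sessions → Spec_aggregate_day_minutes_py sessions (aggregate_day_minutes_py sessions)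

-- ===== LEMMAS AND PROOFS =====

-- membership in a Set after add, as a Bool equation
theorem pv_contains_add (seen : PySem.Set (Option String × Option String)) (k x : Option String × Option String) :
    PySem.Set.contains (PySem.Set.add seen k) x = (PySem.Set.contains seen x || decide (x = k)) := by
  by_cases h : x ∈ PySem.Set.add seen k
  · rw [(PySem.Set.contains_iff _ _).mpr h]
    rcases (PySem.Set.mem_add _ _ _).mp h with h1 | h1
    · rw [(PySem.Set.contains_iff _ _).mpr h1]; simp
    · simp [h1]
  · have h2 : PySem.Set.contains (PySem.Set.add seen k) x = false := by
      rw [Bool.eq_false_iff]; intro hc; exact h ((PySem.Set.contains_iff _ _).mp hc)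
    rw [h2]
    have hn : ¬ (x ∈ seen ∨ x = k) := fun hc => h ((PySem.Set.mem_add _ _ _).mpr hc)
    push Not at hn
    have h3 : PySem.Set.contains seen x = false := by
      rw [Bool.eq_false_iff]; intro hc; exact hn.1 ((PySem.Set.contains_iff _ _).mp hc)
    rw [h3]; simp [hn.2]

-- Bridge invariant: A's state (total, seen) corresponds to B run on the sessions whose
-- key is not yet seen.  Strong induction on the length, since B filters its argument.
theorem pvAB_bridge : ∀ (n : ℕ) (rest : List (List (String × String))), rest.length ≤ n →
    ∀ (total : Int) (seen : PySem.Set (Option String × Option String)),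
      pvA_loop rest total seen
        = total + pvB_loop (rest.filter (fun s => !PySem.Set.contains seen (pv_key s))) := by
  intro n
  induction n with
  | zero =>
    intro rest h total seen
    have : rest = [] := List.eq_nil_of_length_eq_zero (Nat.le_zero.mp h)
    simp [this, pvA_loop, pvB_loop]
  | succ n ih =>
    intro rest h total seen
    match rest with
    | [] => simp [pvA_loop, pvB_loop]
    | session :: rest' =>
      have hlen : rest'.length ≤ n := Nat.lt_succ_iff.mp h
      simp only [pvA_loop]
      rw [List.filter_cons]
      by_cases hk : PySem.Set.contains seen (pv_key session) = true
      · have hk2 : pv_key session ∈ seen := (PySem.Set.contains_iff _ _).mp hk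
        rw [if_pos hk, ih rest' hlen total seen]
        simp [hk2]
      · have hk' : PySem.Set.contains seen (pv_key session) = false := by simpa using hk
        rw [if_neg hk, ih rest' hlen _ (PySem.Set.add seen (pv_key session))]
        simp only [hk', Bool.not_false, if_pos]
        rw [pvB_loop]
        rw [List.filter_filter]
        have hfe : (List.filter (fun s => !PySem.Set.contains (PySem.Set.add seen (pv_key session)) (pv_key s)) rest')
            = List.filter (fun s => decide (pv_key s ≠ pv_key session) && !PySem.Set.contains seen (pv_key s)) rest' := by
          apply List.filter_congr
          intro s _
          rw [pv_contains_add]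
          by_cases hs : pv_key s = pv_key session <;> simp [hs]
        rw [hfe]
        ring

-- ===== VERDICT (by name: the statement is the Claim_ definition above) =====
theorem aggregate_day_minutes_py_spec : Claim_equal_aggregate_day_minutes_py := by
  intro sessions _
  unfold Spec_aggregate_day_minutes_py aggregate_day_minutes_py aggregate_day_minutes_py_alt
  rw [pvAB_bridge sessions.length sessions le_rfl 0 PySem.Set.empty]
  have hfilt : (List.filter (fun s => !PySem.Set.contains PySem.Set.empty (pv_key s)) sessions) = sessions := by
    apply List.filter_eq_self.mpr
    intro s _
    simp [PySem.Set.empty, PySem.Set.contains]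
  rw [hfilt]
  ring
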